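-- pv_equiv track=rewrite | github.com/kasungeesara/PUSL2018-Coursework | task2.py | count_ways_to_make_sum
-- ===== SOURCE A (Python) =====
-- import itertools
--
-- def count_ways_to_make_sum(target_sum, num_dice, num_sides):
--     ways_to_make_sum = 0
--     total_outcomes = 0
--     successful_combinations = []
--     # Generate all possible outcomes
--     outcomes = itertools.product(range(1, num_sides + 1), repeat=num_dice)
--     for outcome in outcomes:
--         total_outcomes += 1
--         if sum(outcome) == target_sum:
--             ways_to_make_sum += 1
--             successful_combinations.append(outcome)
--     return ways_to_make_sum, total_outcomes, successful_combinations
-- ===== SOURCE B (Python) =====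
-- def count_ways_to_make_sum(target_sum, num_dice, num_sides):
--     sides = range(1, num_sides + 1)
--     n = len(sides)
--     total_outcomes = n ** num_dice
--     successful_combinations = []
--
--     def rec(remaining, acc_sum, prefix):
--         need = target_sum - acc_sum
--         if need < remaining or need > remaining * n:
--             return  # no completion of this prefix can reach target_sum
--         if remaining == 0:
--             successful_combinations.append(tuple(prefix))
--             return
--         for v in sides:
--             prefix.append(v)
--             rec(remaining - 1, acc_sum + v, prefix)
--             prefix.pop()
--
--     rec(num_dice, 0, [])
--     return len(successful_combinations), total_outcomes, successful_combinations
-- ===== Notes on version B (the rewrite author's own statement) =====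
-- stated objective: alternative
-- what changed: B replaces the full itertools.product enumeration with a closed-form total (len(sides) ** num_dice) and a pruned depth-first recursion that abandons any prefix whose completions cannot reach target_sum, so only feasible prefixes are ever visited.
import Mathlib
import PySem

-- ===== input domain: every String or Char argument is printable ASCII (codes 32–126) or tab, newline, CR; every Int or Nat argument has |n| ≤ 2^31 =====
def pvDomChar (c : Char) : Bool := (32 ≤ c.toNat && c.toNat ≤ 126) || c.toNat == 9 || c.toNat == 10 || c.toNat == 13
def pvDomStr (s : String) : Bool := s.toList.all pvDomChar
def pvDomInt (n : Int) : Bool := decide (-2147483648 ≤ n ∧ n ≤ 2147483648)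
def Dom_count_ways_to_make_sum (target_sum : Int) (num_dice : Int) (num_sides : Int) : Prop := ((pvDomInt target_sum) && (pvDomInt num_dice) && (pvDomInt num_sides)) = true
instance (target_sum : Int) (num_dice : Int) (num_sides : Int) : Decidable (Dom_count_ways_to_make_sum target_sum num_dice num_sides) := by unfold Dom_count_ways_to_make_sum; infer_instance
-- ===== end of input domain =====

-- B computes the total as a closed form and enumerates the successful combinations by a
-- pruned depth-first recursion instead of filtering the full itertools.product stream.

-- ===== PORT A =====
-- itertools.product(range(1, num_sides+1), repeat=num_dice), lexicographic order
def pvProd (sides : List Int) : Nat → List (List Int)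
  | 0 => [[]]
  | d + 1 => sides.flatMap (fun v => (pvProd sides d).map (fun o => v :: o))

def count_ways_to_make_sum (target_sum : Int) (num_dice : Int) (num_sides : Int) : Int × Int × List (List Int) :=
  let outcomes := pvProd (PySem.List.pyRange 1 (num_sides + 1) 1) num_dice.toNat
  outcomes.foldl
    (fun (st : Int × Int × List (List Int)) o =>
      let (ways, tot, cs) := st
      if o.sum = target_sum then (ways + 1, tot + 1, cs ++ [o]) else (ways, tot + 1, cs))
    (0, 0, [])

-- ===== PORT B =====
-- pruned recursion: drop any prefix whose completions cannot sum to target_sum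
def pvAltGo (target : Int) (sides : List Int) (n : Int) : Nat → Int → List Int → List (List Int)
  | r, accSum, pre =>
    if target - accSum < (r : Int) ∨ target - accSum > (r : Int) * n then []
    else match r with
      | 0 => [pre]
      | r' + 1 => sides.flatMap (fun v => pvAltGo target sides n r' (accSum + v) (pre ++ [v]))

def count_ways_to_make_sum_alt (target_sum : Int) (num_dice : Int) (num_sides : Int) : Int × Int × List (List Int) :=
  let sides := PySem.List.pyRange 1 (num_sides + 1) 1
  let n : Int := sides.length
  let total : Int := n ^ num_dice.toNat
  let succ := pvAltGo target_sum sides n num_dice.toNat 0 []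
  ((succ.length : Int), total, succ)

-- ===== PRECONDITION & SPEC =====
-- A raises ValueError (itertools.product repeat must be non-negative) when num_dice < 0.
def Pre_count_ways_to_make_sum (target_sum : Int) (num_dice : Int) (num_sides : Int) : Prop := 0 ≤ num_dice
instance (target_sum : Int) (num_dice : Int) (num_sides : Int) : Decidable (Pre_count_ways_to_make_sum target_sum num_dice num_sides) := by unfold Pre_count_ways_to_make_sum; infer_instance
def pvWitness_count_ways_to_make_sum : Int × Int × Int := (7, 2, 6)

def Spec_count_ways_to_make_sum (target_sum : Int) (num_dice : Int) (num_sides : Int) (out : Int × Int × List (List Int)) : Prop := out = count_ways_to_make_sum_alt target_sum num_dice num_sides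
instance (target_sum : Int) (num_dice : Int) (num_sides : Int) (out : Int × Int × List (List Int)) : Decidable (Spec_count_ways_to_make_sum target_sum num_dice num_sides out) := by unfold Spec_count_ways_to_make_sum; infer_instance

-- ===== CLAIM (what is proved, stated in full; the proofs are below) =====
def Claim_equal_count_ways_to_make_sum : Prop := ∀ (target_sum : Int) (num_dice : Int) (num_sides : Int), Dom_count_ways_to_make_sum target_sum num_dice num_sides → Pre_count_ways_to_make_sum target_sum num_dice num_sides → Spec_count_ways_to_make_sum target_sum num_dice num_sides (count_ways_to_make_sum target_sum num_dice num_sides)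

-- ===== LEMMAS AND PROOFS =====

-- A's fold is (count of matching, length, matching sublist)
theorem pvFoldA_char (t : Int) (L : List (List Int)) (w tot : Int) (cs : List (List Int)) :
    L.foldl
      (fun (st : Int × Int × List (List Int)) o =>
        let (ways, tot, cs) := st
        if o.sum = t then (ways + 1, tot + 1, cs ++ [o]) else (ways, tot + 1, cs))
      (w, tot, cs)
    = (w + ((L.filter (fun o => o.sum == t)).length : Int),
       tot + (L.length : Int),
       cs ++ L.filter (fun o => o.sum == t)) := by
  induction L generalizing w tot cs with
  | nil => simp
  | cons o L ih =>
    simp only [List.foldl_cons, List.filter_cons]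
    by_cases h : o.sum = t
    · rw [if_pos h]
      simp only [beq_iff_eq, h, ih]
      refine Prod.ext ?_ (Prod.ext ?_ ?_) <;> simp <;> push_cast <;> try ring
    · rw [if_neg h]
      simp only [beq_iff_eq, if_neg h, ih]
      refine Prod.ext ?_ (Prod.ext ?_ ?_) <;> simp <;> push_cast <;> try ring

theorem pvProd_length (sides : List Int) (d : Nat) :
    (pvProd sides d).length = sides.length ^ d := by
  induction d with
  | zero => simp [pvProd]
  | succ d ih =>
    simp [pvProd, List.length_flatMap, ih, pow_succ, Nat.mul_comm]

theorem pvProd_sum_bounds (sides : List Int) (n : Int)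
    (hb : ∀ v ∈ sides, 1 ≤ v ∧ v ≤ n) (d : Nat) :
    ∀ o ∈ pvProd sides d, (d : Int) ≤ o.sum ∧ o.sum ≤ (d : Int) * n := by
  induction d with
  | zero => intro o ho; simp [pvProd] at ho; simp [ho]
  | succ d ih =>
    intro o ho
    simp only [pvProd, List.mem_flatMap, List.mem_map] at ho
    obtain ⟨v, hv, o', ho', rfl⟩ := ho
    obtain ⟨h1, h2⟩ := hb v hv
    obtain ⟨h3, h4⟩ := ih o' ho'
    constructor
    · simp only [List.sum_cons]; push_cast; omega
    · simp only [List.sum_cons]; push_cast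
      have : ((d : Int) + 1) * n = n + (d : Int) * n := by ring
      omega

-- B's recursion computes the filtered product, prefixed
theorem pvAltGo_eq (t : Int) (sides : List Int) (n : Int)
    (hb : ∀ v ∈ sides, 1 ≤ v ∧ v ≤ n) :
    ∀ (r : Nat) (acc : Int) (pre : List Int),
      pvAltGo t sides n r acc pre
        = ((pvProd sides r).filter (fun o => acc + o.sum == t)).map (fun o => pre ++ o) := by
  intro r
  induction r with
  | zero =>
    intro acc pre
    simp only [pvAltGo, pvProd]
    by_cases h : acc = t
    · have : ¬ (t - acc < (0 : Int) ∨ t - acc > (0 : Int) * n) := by omega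
      simp [this, h]
    · have hc : t - acc < (0 : Int) ∨ t - acc > (0 : Int) * n := by omega
      simp [pvAltGo, hc, h]
      omega
  | succ r ih =>
    intro acc pre
    simp only [pvAltGo]
    by_cases hp : t - acc < ((r + 1 : Nat) : Int) ∨ t - acc > ((r + 1 : Nat) : Int) * n
    · -- pruned: the filter is empty since every outcome sum is in [r+1, (r+1)n]
      rw [if_pos hp]
      have hempty : (pvProd sides (r + 1)).filter (fun o => acc + o.sum == t) = [] := by
        rw [List.filter_eq_nil_iff]
        intro o ho
        have := pvProd_sum_bounds sides n hb (r + 1) o ho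
        simp only [beq_iff_eq]
        push_cast at this hp ⊢
        omega
      simp [hempty]
    · rw [if_neg hp]
      simp only [pvProd, List.filter_flatMap, List.map_flatMap]
      congr 1
      funext v
      rw [ih (acc + v) (pre ++ [v])]
      rw [List.filter_map, List.map_map]
      congr 1
      · funext o
        simp
      · apply List.filter_congr
        intro o _
        simp [Function.comp, add_assoc]

theorem count_ways_eq (target_sum num_dice num_sides : Int) (hd : 0 ≤ num_dice) :
    count_ways_to_make_sum target_sum num_dice num_sides
      = count_ways_to_make_sum_alt target_sum num_dice num_sides := by
  unfold count_ways_to_make_sum count_ways_to_make_sum_alt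
  set sides := PySem.List.pyRange 1 (num_sides + 1) 1 with hsides
  have hb : ∀ v ∈ sides, 1 ≤ v ∧ v ≤ (sides.length : Int) := by
    intro v hv
    rw [hsides, PySem.List.mem_pyRange_one] at hv
    rw [hsides, PySem.List.length_pyRange_one]
    constructor
    · omega
    · have : v ≤ num_sides := by omega
      have h2 : ((num_sides + 1 - 1).toNat : Int) = max num_sides 0 := by omega
      simp only [h2]
      omega
  have hgo := pvAltGo_eq target_sum sides (sides.length : Int) hb num_dice.toNat 0 []
  simp only [List.map_nil, List.nil_append, List.map_id'] at hgo
  rw [pvFoldA_char]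
  simp only [hgo, zero_add, List.nil_append, List.map_id]
  have hfe : (pvProd sides num_dice.toNat).filter (fun o => 0 + o.sum == target_sum)
      = (pvProd sides num_dice.toNat).filter (fun o => o.sum == target_sum) := by
    congr 1; funext o; simp
  rw [hfe] at *
  refine Prod.ext rfl (Prod.ext ?_ rfl)
  simp [pvProd_length]

-- ===== VERDICT (by name: the statement is the Claim_ definition above) =====
theorem count_ways_to_make_sum_spec : Claim_equal_count_ways_to_make_sum := by
  intro t d s _ hpre
  unfold Spec_count_ways_to_make_sum
  exact count_ways_eq t d s hpre
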